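-- pv_equiv track=rewrite | github.com/SamlKeller/CS | Unit 2/2blue1.py | list_mults
-- ===== SOURCE A (Python) =====
-- def list_mults (a, b):
--     list = []
--     iterator = b
--     while (iterator > a+1):
--         iterator -= 1
--         if (iterator % 5 == 0 or iterator % 3 == 0):
--             list.append(iterator)
--     return list[::-1]
-- ===== SOURCE B (Python) =====
-- def list_mults(a, b):
--     lo = a + 1
--     s = set()
--     for step in (3, 5):
--         start = lo + (-lo) % step
--         s.update(range(start, b, step))
--     return sorted(s)
-- ===== Notes on version B (the rewrite author's own statement) =====
-- stated objective: alternative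
-- what changed: Instead of scanning every integer from b-1 down to a+1 and testing divisibility, B generates the two arithmetic progressions of multiples of 3 and of 5 inside the open interval by stepped ranges, deduplicates them in a set, and returns the sorted result.
import Mathlib
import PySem

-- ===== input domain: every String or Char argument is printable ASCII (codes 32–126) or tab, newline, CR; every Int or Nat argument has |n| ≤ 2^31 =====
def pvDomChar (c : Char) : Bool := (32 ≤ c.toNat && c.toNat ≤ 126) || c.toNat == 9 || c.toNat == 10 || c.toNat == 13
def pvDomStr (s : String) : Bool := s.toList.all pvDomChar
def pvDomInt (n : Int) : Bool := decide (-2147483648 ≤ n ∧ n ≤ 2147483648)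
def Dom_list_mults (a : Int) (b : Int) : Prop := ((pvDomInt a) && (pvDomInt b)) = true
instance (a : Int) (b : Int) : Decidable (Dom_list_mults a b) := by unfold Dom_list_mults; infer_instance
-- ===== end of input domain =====

-- B replaces A's scan-and-test of every integer in (a, b) by generating the two arithmetic
-- progressions of multiples of 3 and of 5 directly, deduplicating via a set, then sorting (objective: alternative).

-- ===== PORT A =====
-- the while loop, fuel = number of iterations (iterator goes b-1, b-2, …, a+1)
def listMultsGo : Nat → Int → List Int → List Int
  | 0, _, l => l
  | n+1, it, l =>
    let it' := it - 1
    if PySem.Int.mod it' 5 == 0 || PySem.Int.mod it' 3 == 0 then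
      listMultsGo n it' (l ++ [it'])
    else
      listMultsGo n it' l

def list_mults (a : Int) (b : Int) : List Int :=
  (listMultsGo ((b - (a+1)).toNat) b []).reverse   -- list[::-1]

-- ===== PORT B =====
def list_mults_alt (a : Int) (b : Int) : List Int :=
  let lo := a + 1
  let s : PySem.Set Int :=
    ([3, 5] : List Int).foldl
      (fun s step =>
        PySem.Set.update s (PySem.List.pyRange (lo + PySem.Int.mod (-lo) step) b step))
      PySem.Set.empty
  PySem.List.sorted s (fun x => x) false

-- ===== PRECONDITION & SPEC =====
def Spec_list_mults (a : Int) (b : Int) (out : List Int) : Prop := out = list_mults_alt a b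
instance (a : Int) (b : Int) (out : List Int) : Decidable (Spec_list_mults a b out) := by unfold Spec_list_mults; infer_instance

-- ===== CLAIM (what is proved, stated in full; the proofs are below) =====
def Claim_equal_list_mults : Prop := ∀ (a : Int) (b : Int), Dom_list_mults a b → Spec_list_mults a b (list_mults a b)

-- ===== LEMMAS AND PROOFS =====

-- the divisibility test of A, as a predicate
def pvP (x : Int) : Bool := PySem.Int.mod x 5 == 0 || PySem.Int.mod x 3 == 0

lemma pvP_iff (x : Int) : pvP x = true ↔ x % 5 = 0 ∨ x % 3 = 0 := by
  simp [pvP, PySem.Int.mod_eq_emod_of_pos (by norm_num : (0:Int) < 5),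
        PySem.Int.mod_eq_emod_of_pos (by norm_num : (0:Int) < 3)]

lemma listMultsGo_eq (n : Nat) : ∀ (it : Int) (l : List Int),
    listMultsGo n it l = l ++ ((PySem.List.pyRange (it - n) it 1).filter pvP).reverse := by
  induction n with
  | zero =>
    intro it l
    simp [listMultsGo, PySem.List.pyRange_one_eq_nil (by omega : it ≤ it)]
  | succ n ih =>
    intro it l
    have hsplit : PySem.List.pyRange (it - (n+1 : Nat)) it 1
        = PySem.List.pyRange ((it - 1) - n) (it - 1) 1 ++ [it - 1] := by
      have : (it : Int) = (it - 1) + 1 := by ring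
      rw [show (it - (n+1:Nat) : Int) = (it - 1) - n by push_cast; ring]
      calc PySem.List.pyRange ((it-1) - n) it 1
          = PySem.List.pyRange ((it-1) - n) ((it-1)+1) 1 := by rw [← this]
        _ = PySem.List.pyRange ((it-1) - n) (it-1) 1 ++ [it-1] :=
            PySem.List.pyRange_one_succ_right (by omega)
    show (if pvP (it - 1) then listMultsGo n (it-1) (l ++ [it-1]) else listMultsGo n (it-1) l)
        = l ++ ((PySem.List.pyRange (it - (n+1:Nat)) it 1).filter pvP).reverse
    rw [hsplit, List.filter_append, List.reverse_append]
    by_cases h : pvP (it - 1)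
    · simp [h, ih]
    · simp [h, ih]

lemma list_mults_eq_filter (a b : Int) :
    list_mults a b = (PySem.List.pyRange (a+1) b 1).filter pvP := by
  unfold list_mults
  rw [listMultsGo_eq]
  by_cases h : a + 1 ≤ b
  · have h2 : (b - ((b - (a+1)).toNat : Int)) = a + 1 := by omega
    rw [h2]
    simp
  · have h1 : ((b - (a+1)).toNat : Int) = 0 := by omega
    rw [h1]
    simp [PySem.List.pyRange_one_eq_nil (le_refl b),
          PySem.List.pyRange_one_eq_nil (by omega : b ≤ a + 1)]

-- membership of the arithmetic progression of step 3 starting at the first multiple ≥ lo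
lemma mem_prog3 (lo b x : Int) :
    x ∈ PySem.List.pyRange (lo + PySem.Int.mod (-lo) 3) b 3 ↔ lo ≤ x ∧ x < b ∧ x % 3 = 0 := by
  rw [PySem.List.mem_pyRange_iff_of_pos (by norm_num),
      PySem.Int.mod_eq_emod_of_pos (by norm_num : (0:Int) < 3), Int.dvd_iff_emod_eq_zero]
  omega

lemma mem_prog5 (lo b x : Int) :
    x ∈ PySem.List.pyRange (lo + PySem.Int.mod (-lo) 5) b 5 ↔ lo ≤ x ∧ x < b ∧ x % 5 = 0 := by
  rw [PySem.List.mem_pyRange_iff_of_pos (by norm_num),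
      PySem.Int.mod_eq_emod_of_pos (by norm_num : (0:Int) < 5), Int.dvd_iff_emod_eq_zero]
  omega

lemma list_mults_alt_eq_filter (a b : Int) :
    list_mults_alt a b = (PySem.List.pyRange (a+1) b 1).filter pvP := by
  unfold list_mults_alt
  simp only [List.foldl]
  set lo := a + 1 with hlo
  set s : PySem.Set Int :=
    PySem.Set.update
      (PySem.Set.update PySem.Set.empty (PySem.List.pyRange (lo + PySem.Int.mod (-lo) 3) b 3))
      (PySem.List.pyRange (lo + PySem.Int.mod (-lo) 5) b 5) with hs
  have hnodup_s : s.Nodup := by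
    apply PySem.Set.nodup_update
    apply PySem.Set.nodup_update
    exact List.nodup_nil
  have hmem : ∀ x : Int, x ∈ s ↔ (lo ≤ x ∧ x < b ∧ (x % 5 = 0 ∨ x % 3 = 0)) := by
    intro x
    rw [hs, PySem.Set.mem_update, PySem.Set.mem_update, mem_prog3, mem_prog5]
    constructor
    · rintro ((h | h) | h)
      · cases h
      · exact ⟨h.1, h.2.1, Or.inr h.2.2⟩
      · exact ⟨h.1, h.2.1, Or.inl h.2.2⟩
    · rintro ⟨h1, h2, (h3 | h3)⟩
      · exact Or.inr ⟨h1, h2, h3⟩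
      · exact Or.inl (Or.inr ⟨h1, h2, h3⟩)
  apply PySem.List.sorted_eq_of_perm_of_pairwise_lt
  · -- filter ~ s
    rw [List.perm_ext_iff_of_nodup (List.Nodup.filter _ (PySem.List.nodup_pyRange_one _ _)) hnodup_s]
    intro x
    rw [List.mem_filter, PySem.List.mem_pyRange_one, hmem, pvP_iff]
    tauto
  · exact List.Pairwise.filter _ (PySem.List.pairwise_lt_pyRange_one lo b)

-- ===== VERDICT (by name: the statement is the Claim_ definition above) =====
theorem list_mults_spec : Claim_equal_list_mults := by
  intro a b _
  unfold Spec_list_mults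
  rw [list_mults_eq_filter, list_mults_alt_eq_filter]
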